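-- pv_equiv track=rewrite | github.com/joshuaKnauber/scripting_nodes | nodes/templates/PropertyReferenceNode.py | _disect_data_path
-- ===== SOURCE A (Python) =====
-- def _disect_data_path(path):
--     # remove assign part
--     path = path.split("=")[0]
--     path = path.strip()
--     # replace escaped quotes
--     path = path.replace('\\"', '"')
--     # split data path in segments
--     segments = []
--     for segment in path.split(".")[1:]:
--         if segments and "[" in segments[-1] and not "]" in segments[-1]:
--             segments[-1] += f".{segment}"
--         else:
--             segments.append(segment)
--     # remove indexing from property name
--     segments[-1] = segments[-1].split("[")[0]
--     return segments
-- ===== SOURCE B (Python) =====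
-- def _disect_data_path(path):
--     # one left-to-right character scan instead of split-then-merge
--     path = path.split("=")[0].strip().replace('\\"', '"')
--     rest = path[path.index(".") + 1:]
--     segments = []
--     cur = []
--     seen_open = False
--     seen_close = False
--     for ch in rest:
--         if ch == "." and not (seen_open and not seen_close):
--             segments.append("".join(cur))
--             cur = []
--             seen_open = False
--             seen_close = False
--         else:
--             cur.append(ch)
--             if ch == "[":
--                 seen_open = True
--             elif ch == "]":
--                 seen_close = True
--     last = "".join(cur)
--     segments.append(last.split("[")[0])
--     return segments
-- ===== Notes on version B (the rewrite author's own statement) =====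
-- stated objective: alternative
-- what changed: A splits the path on every '.' and then re-merges segments that have an unclosed '[' in a second list-mutating loop; B makes a single left-to-right character scan that only ends a segment at a '.' outside an unclosed bracket, tracking two booleans.
import Mathlib
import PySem

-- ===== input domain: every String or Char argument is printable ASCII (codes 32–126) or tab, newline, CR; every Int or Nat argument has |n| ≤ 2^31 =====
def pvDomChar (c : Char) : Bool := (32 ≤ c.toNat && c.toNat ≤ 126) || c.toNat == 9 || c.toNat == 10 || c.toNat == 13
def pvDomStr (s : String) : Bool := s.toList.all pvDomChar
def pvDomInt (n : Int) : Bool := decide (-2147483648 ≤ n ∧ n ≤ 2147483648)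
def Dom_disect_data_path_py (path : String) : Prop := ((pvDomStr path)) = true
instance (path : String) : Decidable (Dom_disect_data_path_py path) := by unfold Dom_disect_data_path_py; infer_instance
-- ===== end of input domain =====

-- B replaces A's split-on-every-dot + merge-back-bracketed-segments loop by a single
-- left-to-right character scan that only breaks at a '.' outside an unclosed '['…;
-- objective: alternative decomposition (same cost), return value only.

-- shared preprocessing, literally Python's path.split("=")[0].strip().replace('\\"','"')
def pvPreprocess (path : String) : List Char :=
  PySem.Chars.replace
    (PySem.Chars.strip
      ((PySem.List.pyGet? ((PySem.Chars.split? path.toList ['=']).getD []) 0).getD []))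
    ['\\', '"'] ['"']

-- literally Python's s.split("[")[0]
def pvSplitBracketHead (s : List Char) : List Char :=
  (PySem.List.pyGet? ((PySem.Chars.split? s ['[']).getD []) 0).getD []

-- ===== PORT A =====
-- one iteration of A's merging loop ("segments and" guard = the none case)
def pvAStep (segs : List (List Char)) (seg : List Char) : List (List Char) :=
  match segs.getLast? with
  | some last =>
      if PySem.Chars.isIn ['['] last && !(PySem.Chars.isIn [']'] last) then
        segs.dropLast ++ [last ++ '.' :: seg]
      else segs ++ [seg]
  | none => segs ++ [seg]

def disect_data_path_py (path : String) : List String :=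
  let p := pvPreprocess path
  let segments :=
    (PySem.List.slice ((PySem.Chars.split? p ['.']).getD []) (some 1) none).foldl pvAStep []
  match segments.getLast? with
  | some last => (segments.dropLast ++ [pvSplitBracketHead last]).map String.ofList
  | none => []  -- Python raises IndexError here; excluded by Pre_

-- ===== PORT B =====
-- one iteration of B's character scan: state (segments, current, seen '[', seen ']')
def pvBStep (st : List (List Char) × List Char × Bool × Bool) (ch : Char) :
    List (List Char) × List Char × Bool × Bool :=
  match st with
  | (segs, cur, so, sc) =>
    if ch == '.' && !(so && !sc) then (segs ++ [cur], [], false, false)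
    else
      let cur' := cur ++ [ch]
      if ch == '[' then (segs, cur', true, sc)
      else if ch == ']' then (segs, cur', so, true)
      else (segs, cur', so, sc)

def disect_data_path_py_alt (path : String) : List String :=
  let p := pvPreprocess path
  let rest := PySem.List.slice p (some (PySem.Chars.find p ['.'] + 1)) none
  match rest.foldl pvBStep ([], [], false, false) with
  | (segs, cur, _, _) => (segs ++ [pvSplitBracketHead cur]).map String.ofList

-- ===== PRECONDITION & SPEC =====
-- Pre_ excludes exactly the inputs on which Python A raises IndexError (and Python B
-- ValueError): those whose preprocessed path contains no '.'.
def Pre_disect_data_path_py (path : String) : Prop :=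
  PySem.Chars.isIn ['.'] (pvPreprocess path) = true
instance (path : String) : Decidable (Pre_disect_data_path_py path) := by
  unfold Pre_disect_data_path_py; infer_instance
def pvWitness_disect_data_path_py : String := "bpy.data.objects[\"Cube\"].location"

def Spec_disect_data_path_py (path : String) (out : List String) : Prop := out = disect_data_path_py_alt path
instance (path : String) (out : List String) : Decidable (Spec_disect_data_path_py path out) := by unfold Spec_disect_data_path_py; infer_instance

-- ===== CLAIM (what is proved, stated in full; the proofs are below) =====
def Claim_equal_disect_data_path_py : Prop := ∀ (path : String), Dom_disect_data_path_py path → Pre_disect_data_path_py path → Spec_disect_data_path_py path (disect_data_path_py path)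

-- ===== LEMMAS AND PROOFS =====

-- structural single-char split: pvSplit1 ch b = (first ch-free piece, remaining pieces)
def pvSplit1 (ch : Char) (b : List Char) : List Char × List (List Char) :=
  match b with
  | [] => ([], [])
  | c :: r =>
      let (h, t) := pvSplit1 ch r
      if c = ch then ([], h :: t) else (c :: h, t)

-- the semantic scan B implements, with the booleans replaced by membership
def pvG (segs : List (List Char)) (cur : List Char) : List Char → List (List Char) × List Char
  | [] => (segs, cur)
  | c :: r =>
      if c == '.' && !(cur.contains '[' && !cur.contains ']') then pvG (segs ++ [cur]) [] r
      else pvG segs (cur ++ [c]) r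

theorem pvSplitOn_go_eq (ch : Char) :
    ∀ (fuel : Nat) (l cur : List Char) (acc : List (List Char)), l.length < fuel →
      PySem.Chars.splitOn.go [ch] fuel l cur acc
        = acc.reverse ++ List.modifyHead (cur.reverse ++ ·) ((pvSplit1 ch l).1 :: (pvSplit1 ch l).2) := by
  intro fuel
  induction fuel with
  | zero => intro l cur acc h; omega
  | succ f ih =>
    intro l cur acc h
    cases l with
    | nil => simp [PySem.Chars.splitOn.go, pvSplit1]
    | cons c rest =>
      rw [PySem.Chars.splitOn.go]
      simp only [List.isPrefixOf]
      by_cases hc : ch = c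
      · subst hc
        simp only [List.length_cons] at h
        simp only [beq_self_eq_true, List.isPrefixOf, Bool.true_and, if_pos]
        rw [show List.drop [ch].length (ch :: rest) = rest from rfl]
        rw [ih rest [] (cur.reverse :: acc) (by omega)]
        simp [pvSplit1]
      · simp only [List.length_cons] at h
        rw [if_neg (by simp [List.isPrefixOf]; exact fun hh => hc hh)]
        rw [ih rest (c :: cur) acc (by omega)]
        have hc' : ¬ c = ch := fun hh => hc hh.symm
        simp only [pvSplit1, hc', if_neg, List.reverse_cons]
        cases (pvSplit1 ch rest) with
        | mk hh tt => simp

theorem pvSplitOn_eq (ch : Char) (l : List Char) :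
    PySem.Chars.splitOn l [ch] = (pvSplit1 ch l).1 :: (pvSplit1 ch l).2 := by
  rw [PySem.Chars.splitOn, pvSplitOn_go_eq ch (l.length + 1) l [] [] (by omega)]
  simp

theorem pvIsIn_singleton (c : Char) (l : List Char) :
    PySem.Chars.isIn [c] l = l.contains c := by
  by_cases h : c ∈ l
  · have hinf : [c] <:+: l := by
      obtain ⟨s, t, rfl⟩ := List.append_of_mem h
      exact ⟨s, t, by simp⟩
    rw [(PySem.Chars.isIn_iff_infix _ _).2 hinf]
    simp [h]
  · have : ¬ [c] <:+: l := fun hinf => h (hinf.subset (by simp))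
    have h2 : PySem.Chars.isIn [c] l = false := by
      cases hh : PySem.Chars.isIn [c] l
      · rfl
      · exact absurd ((PySem.Chars.isIn_iff_infix _ _).1 hh) this
    rw [h2]
    simp [h]

theorem pvCore (b : List Char) : ∀ (segs : List (List Char)) (cur : List Char),
    (pvG segs cur b).1 ++ [(pvG segs cur b).2]
      = ((pvSplit1 '.' b).2).foldl pvAStep (segs ++ [cur ++ (pvSplit1 '.' b).1]) := by
  induction b with
  | nil => intro segs cur; simp [pvG, pvSplit1]
  | cons c r ih =>
    intro segs cur
    by_cases hc : c = '.'
    · subst hc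
      simp only [pvSplit1, pvG, beq_self_eq_true, Bool.true_and, if_true, reduceCtorEq, reduceIte]
      have hstep : pvAStep (segs ++ [cur]) (pvSplit1 '.' r).1
          = if cur.contains '[' && !cur.contains ']' then segs ++ [cur ++ '.' :: (pvSplit1 '.' r).1]
            else (segs ++ [cur]) ++ [(pvSplit1 '.' r).1] := by
        simp [pvAStep, List.getLast?_concat, List.dropLast_concat, pvIsIn_singleton]
      by_cases hm : (cur.contains '[' && !cur.contains ']') = true
      · rw [if_neg (by rw [hm]; simp)]
        rw [ih segs (cur ++ ['.'])]
        rw [List.foldl_cons, List.append_nil, hstep, if_pos hm]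
        congr 2
        simp
      · have hmf : (cur.contains '[' && !cur.contains ']') = false := by
          revert hm; cases (cur.contains '[' && !cur.contains ']') <;> simp
        rw [if_pos (by rw [hmf]; simp)]
        rw [ih (segs ++ [cur]) []]
        rw [List.foldl_cons, List.append_nil, hstep, if_neg (by rw [hmf]; simp)]
        simp
    · have hc' : (c == '.') = false := by simpa using hc
      simp only [pvSplit1, pvG, hc', Bool.false_and, if_neg, Bool.false_eq_true, not_false_eq_true,
        if_false]
      rw [if_neg hc]
      rw [ih segs (cur ++ [c])]
      simp

theorem pvBfold_eq (b : List Char) : ∀ (segs : List (List Char)) (cur : List Char),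
    b.foldl pvBStep (segs, cur, cur.contains '[', cur.contains ']')
      = ((pvG segs cur b).1, (pvG segs cur b).2,
         (pvG segs cur b).2.contains '[', (pvG segs cur b).2.contains ']') := by
  induction b with
  | nil => intro segs cur; simp [pvG]
  | cons c r ih =>
    intro segs cur
    simp only [List.foldl_cons, pvBStep, pvG]
    by_cases hd : (c == '.' && !(cur.contains '[' && !cur.contains ']')) = true
    · rw [if_pos hd, if_pos hd]
      simpa using ih (segs ++ [cur]) []
    · rw [if_neg hd, if_neg hd]
      by_cases h1 : c = '['
      · subst h1; simp only [beq_self_eq_true, if_pos]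
        have := ih segs (cur ++ ['['])
        simpa using this
      · rw [if_neg (by simpa using h1)]
        by_cases h2 : c = ']'
        · subst h2; simp only [beq_self_eq_true, if_pos]
          simpa using ih segs (cur ++ [']'])
        · rw [if_neg (by simpa using h2)]
          have e1 : ('[' == c) = false := by simpa using fun hh : '[' = c => h1 hh.symm
          have e2 : (']' == c) = false := by simpa using fun hh : ']' = c => h2 hh.symm
          have := ih segs (cur ++ [c])
          simp only [List.contains_append, List.contains_cons, List.contains_nil, e1, e2,
            Bool.or_false] at this
          exact this

theorem pvSplit1_append (a b : List Char) (ha : '.' ∉ a) :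
    pvSplit1 '.' (a ++ '.' :: b) = (a, (pvSplit1 '.' b).1 :: (pvSplit1 '.' b).2) := by
  induction a with
  | nil => simp [pvSplit1]
  | cons x a ih =>
    have hx : ¬ x = '.' := fun h => ha (by simp [h])
    have ih' := ih (fun h => ha (by simp [h]))
    simp only [List.cons_append, pvSplit1, ih', hx, if_neg, if_false]

-- ===== VERDICT (by name: the statement is the Claim_ definition above) =====
theorem disect_data_path_py_spec : Claim_equal_disect_data_path_py := by
  intro path _hdom hpre
  unfold Spec_disect_data_path_py
  unfold Pre_disect_data_path_py at hpre
  unfold disect_data_path_py disect_data_path_py_alt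
  set p := pvPreprocess path with hp
  -- the first '.' of p
  have hinf : ['.'] <:+: p := (PySem.Chars.isIn_iff_infix _ _).1 hpre
  have h0 : 0 ≤ PySem.Chars.find p ['.'] := (PySem.Chars.find_nonneg_iff _ _).2 hinf
  obtain ⟨hpref, hmin⟩ := PySem.Chars.find_spec h0
  set n := (PySem.Chars.find p ['.']).toNat with hn
  obtain ⟨t, ht⟩ := hpref
  have hdropn : p.drop n = '.' :: p.drop (n + 1) := by
    have h1 : p.drop (n + 1) = (p.drop n).drop 1 := by rw [List.drop_drop]
    rw [h1, ← ht]
    simp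
  set a := p.take n with hadef
  set b := p.drop (n + 1) with hbdef
  have hsplitp : p = a ++ '.' :: b := by
    conv_lhs => rw [← List.take_append_drop n p]
    rw [hdropn]
  have hnotin : '.' ∉ a := by
    intro hmem
    obtain ⟨i, hi, hgi⟩ := List.getElem_of_mem hmem
    have hilen : i < n := lt_of_lt_of_le hi (by simp [hadef])
    have hip : i < p.length := by
      have : n ≤ p.length := by
        by_contra hcon
        push_neg at hcon
        rw [List.drop_eq_nil_of_le (le_of_lt hcon)] at hdropn
        simp at hdropn
      omega
    refine hmin i hilen ⟨p.drop (i + 1), ?_⟩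
    have hpi : p[i] = '.' := by
      rw [← hgi]
      simp [hadef]
    rw [show (['.'] : List Char) ++ p.drop (i + 1) = '.' :: p.drop (i + 1) from rfl]
    rw [← List.getElem_cons_drop hip, hpi]
  -- A's split pieces
  have hsplit? : (PySem.Chars.split? p ['.']).getD [] = PySem.Chars.splitOn p ['.'] := rfl
  have hpieces : PySem.Chars.splitOn p ['.']
      = a :: (pvSplit1 '.' b).1 :: (pvSplit1 '.' b).2 := by
    rw [pvSplitOn_eq '.' p]
    rw [hsplitp, pvSplit1_append a b hnotin]
  have hslice1 : PySem.List.slice (PySem.Chars.splitOn p ['.']) (some 1) none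
      = (pvSplit1 '.' b).1 :: (pvSplit1 '.' b).2 := by
    rw [PySem.List.slice_from _ (by norm_num : (0:Int) ≤ 1), hpieces]
    rfl
  -- B's rest
  have hfind : PySem.Chars.find p ['.'] = (n : Int) := by rw [hn, Int.toNat_of_nonneg h0]
  have hrest : PySem.List.slice p (some (PySem.Chars.find p ['.'] + 1)) none = b := by
    rw [hfind, show ((n : Int) + 1) = ((n + 1 : Nat) : Int) by push_cast; ring]
    rw [PySem.List.slice_from _ (by positivity)]
    simp [hbdef]
  -- run both programs
  have hbf := pvBfold_eq b [] []
  simp only [List.contains_nil] at hbf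
  simp only [hsplit?, hslice1, hrest]
  have hAfold : List.foldl pvAStep [] ((pvSplit1 '.' b).1 :: (pvSplit1 '.' b).2)
      = (pvG [] [] b).1 ++ [(pvG [] [] b).2] := by
    rw [List.foldl_cons]
    rw [show pvAStep [] (pvSplit1 '.' b).1 = [] ++ [[] ++ (pvSplit1 '.' b).1] from by simp [pvAStep]]
    exact (pvCore b [] []).symm
  rw [hAfold, hbf]
  rw [List.getLast?_concat, List.dropLast_concat]
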